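-- pv_equiv track=rewrite | github.com/Vyxal/Vyxal | vyxal/interpreter.py | split_on_words
-- ===== SOURCE A (Python) =====
-- import string
--
-- def split_on_words(item):
--     parts = []
--     word = ""
--
--     for char in item:
--         if char not in string.ascii_letters:
--             if word:
--                 parts.append(word)
--             word = ""
--             parts.append(char)
--         else:
--             word += char
--
--     if word:
--         parts.append(word)
--     return parts
-- ===== SOURCE B (Python) =====
-- def split_on_words(item):
--     parts = []
--     i = 0
--     n = len(item)
--     while i < n:
--         c = item[i]
--         if ('A' <= c <= 'Z') or ('a' <= c <= 'z'):
--             j = i + 1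
--             while j < n:
--                 d = item[j]
--                 if ('A' <= d <= 'Z') or ('a' <= d <= 'z'):
--                     j += 1
--                 else:
--                     break
--             parts.append(item[i:j])
--             i = j
--         else:
--             parts.append(c)
--             i += 1
--     return parts
-- ===== Notes on version B (the rewrite author's own statement) =====
-- stated objective: alternative
-- what changed: Replaced A's per-character state machine (current-word accumulator with flush on non-letter and a trailing flush) by a chunking scan: at each position either slice out the whole maximal letter run at once or emit the single non-letter, so no word accumulator or final flush exists.
import Mathlib
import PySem

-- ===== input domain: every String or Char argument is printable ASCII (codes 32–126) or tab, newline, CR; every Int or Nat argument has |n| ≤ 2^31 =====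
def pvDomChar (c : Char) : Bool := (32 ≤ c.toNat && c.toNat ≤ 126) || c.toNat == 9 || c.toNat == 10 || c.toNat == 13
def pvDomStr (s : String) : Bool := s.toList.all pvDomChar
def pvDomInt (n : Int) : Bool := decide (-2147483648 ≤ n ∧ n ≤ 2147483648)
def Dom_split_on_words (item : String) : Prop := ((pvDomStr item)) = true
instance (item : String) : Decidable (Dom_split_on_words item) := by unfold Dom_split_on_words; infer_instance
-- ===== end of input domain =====

-- B replaces A's accumulator state machine by slicing out each maximal letter run at once (alternative decomposition, same cost).

-- ===== PORT A =====
-- 'char in string.ascii_letters' : exactly the 52 ASCII letters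
def pvLetter (c : Char) : Bool := ('A' ≤ c && c ≤ 'Z') || ('a' ≤ c && c ≤ 'z')

-- one step of A's for-loop; state = (parts, word), word kept as List Char (Python string built by +=)
def pvStepA (pw : List String × List Char) (char : Char) : List String × List Char :=
  if !pvLetter char then
    ((if pw.2 ≠ [] then pw.1 ++ [String.mk pw.2] else pw.1) ++ [String.mk [char]], [])
  else
    (pw.1, pw.2 ++ [char])

def split_on_words (item : String) : List String :=
  let st := item.toList.foldl pvStepA ([], [])
  if st.2 ≠ [] then st.1 ++ [String.mk st.2] else st.1

-- ===== PORT B =====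
-- B's while-loop: at a letter, slice the whole maximal run (inner j-scan = takeWhile/dropWhile); else emit the single char
def pvGoB : List Char → List String
  | [] => []
  | c :: cs =>
    if pvLetter c then
      String.mk (c :: cs.takeWhile pvLetter) :: pvGoB (cs.dropWhile pvLetter)
    else
      String.mk [c] :: pvGoB cs
termination_by l => l.length
decreasing_by
  · simpa using Nat.lt_succ_of_le (List.length_dropWhile_le _ _)
  · simp

def split_on_words_alt (item : String) : List String := pvGoB item.toList

-- ===== PRECONDITION & SPEC =====
def Spec_split_on_words (item : String) (out : List String) : Prop := out = split_on_words_alt item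
instance (item : String) (out : List String) : Decidable (Spec_split_on_words item out) := by unfold Spec_split_on_words; infer_instance

-- ===== CLAIM (what is proved, stated in full; the proofs are below) =====
def Claim_equal_split_on_words : Prop := ∀ (item : String), Dom_split_on_words item → Spec_split_on_words item (split_on_words item)

-- ===== LEMMAS AND PROOFS =====

def pvFlush (st : List String × List Char) : List String :=
  if st.2 ≠ [] then st.1 ++ [String.mk st.2] else st.1

lemma pvStepA_letter (p : List String) (w : List Char) (c : Char) (h : pvLetter c = true) :
    pvStepA (p, w) c = (p, w ++ [c]) := by simp [pvStepA, h]

lemma pvStepA_non (p : List String) (w : List Char) (c : Char) (h : pvLetter c = false) :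
    pvStepA (p, w) c = (p ++ ((if w ≠ [] then [String.mk w] else []) ++ [String.mk [c]]), []) := by
  by_cases hw : w = [] <;> simp [pvStepA, h, hw]

lemma pvFoldA_acc (cs : List Char) : ∀ (p : List String) (w : List Char),
    cs.foldl pvStepA (p, w) = (p ++ (cs.foldl pvStepA ([], w)).1, (cs.foldl pvStepA ([], w)).2) := by
  induction cs with
  | nil => intro p w; simp
  | cons c cs ih =>
    intro p w
    simp only [List.foldl_cons]
    cases h : pvLetter c
    · rw [pvStepA_non p w c h, pvStepA_non [] w c h, ih, List.nil_append,
        ih ((if w ≠ [] then [String.mk w] else []) ++ [String.mk [c]])]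
      simp
    · rw [pvStepA_letter p w c h, pvStepA_letter [] w c h, ih]

lemma pvFlush_acc (cs : List Char) (p : List String) (w : List Char) :
    pvFlush (cs.foldl pvStepA (p, w)) = p ++ pvFlush (cs.foldl pvStepA ([], w)) := by
  rw [pvFoldA_acc]
  unfold pvFlush
  by_cases hr : (cs.foldl pvStepA ([], w)).2 = [] <;> simp [hr]

lemma pvGoB_chunk (cs : List Char) :
    (if cs.takeWhile pvLetter = [] then [] else [String.mk (cs.takeWhile pvLetter)])
      ++ pvGoB (cs.dropWhile pvLetter) = pvGoB cs := by
  cases cs with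
  | nil => simp [pvGoB]
  | cons c cs =>
    cases hc : pvLetter c
    · simp [List.takeWhile_cons, List.dropWhile_cons, hc]
    · simp [pvGoB, List.takeWhile_cons, List.dropWhile_cons, hc]

lemma pvMain (cs : List Char) : ∀ (w : List Char),
    pvFlush (cs.foldl pvStepA ([], w)) =
      (if w ++ cs.takeWhile pvLetter = [] then [] else [String.mk (w ++ cs.takeWhile pvLetter)])
        ++ pvGoB (cs.dropWhile pvLetter) := by
  induction cs with
  | nil =>
    intro w
    by_cases hw : w = [] <;> simp [pvFlush, pvGoB, hw]
  | cons c cs ih =>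
    intro w
    cases h : pvLetter c
    · rw [List.foldl_cons, pvStepA_non [] w c h, List.nil_append, pvFlush_acc,
        ih [], List.nil_append, pvGoB_chunk]
      simp only [List.takeWhile_cons, List.dropWhile_cons, h, Bool.false_eq_true,
        if_false, List.append_nil]
      rw [pvGoB]
      simp only [h, Bool.false_eq_true, if_false]
      by_cases hw : w = [] <;> simp [hw]
    · rw [List.foldl_cons, pvStepA_letter [] w c h, ih (w ++ [c])]
      simp only [List.takeWhile_cons, List.dropWhile_cons, h, if_true]
      simp

-- ===== VERDICT (by name: the statement is the Claim_ definition above) =====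
theorem split_on_words_spec : Claim_equal_split_on_words := by
  intro item _
  show split_on_words item = split_on_words_alt item
  unfold split_on_words split_on_words_alt
  have h := pvMain item.toList []
  simp only [List.nil_append] at h
  show pvFlush (item.toList.foldl pvStepA ([], [])) = pvGoB item.toList
  rw [h, pvGoB_chunk]
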